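-- pv_equiv track=rewrite | github.com/ishitachaturvedi/gpgpu-sim_distribution | fast_v2_indep_SM_sched.py | init_five_final
-- ===== SOURCE A (Python) =====
-- def init_five_final(numStalls):
--     warp_five_c = []
--     for i in range(numStalls):
--         stall1 = []
--         for j in range(i+1,numStalls):
--             stall2 = []
--             for k in range(j+1,numStalls):
--                 stall3 = []
--                 for k1 in range(k+1,numStalls):
--                     stall4 = []
--                     for k2 in range(k1+1,numStalls):
--                         temp1=[]
--                         temp1.append(0)
--                         temp1.append(0)
--                         stall4.append(temp1)
--                     stall3.append(stall4)
--                 stall2.append(stall3)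
--             stall1.append(stall2)
--         warp_five_c.append(stall1)
--     return warp_five_c
-- ===== SOURCE B (Python) =====
-- def init_five_final(numStalls):
--     def build(start, depth):
--         if depth == 0:
--             return [0, 0]
--         return [build(x + 1, depth - 1) for x in range(start, numStalls)]
--     return build(0, 5)
-- ===== Notes on version B (the rewrite author's own statement) =====
-- stated objective: simpler
-- what changed: The five explicitly nested accumulator loops are replaced by one recursive helper build(start, depth) that treats all five levels uniformly.
import Mathlib
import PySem

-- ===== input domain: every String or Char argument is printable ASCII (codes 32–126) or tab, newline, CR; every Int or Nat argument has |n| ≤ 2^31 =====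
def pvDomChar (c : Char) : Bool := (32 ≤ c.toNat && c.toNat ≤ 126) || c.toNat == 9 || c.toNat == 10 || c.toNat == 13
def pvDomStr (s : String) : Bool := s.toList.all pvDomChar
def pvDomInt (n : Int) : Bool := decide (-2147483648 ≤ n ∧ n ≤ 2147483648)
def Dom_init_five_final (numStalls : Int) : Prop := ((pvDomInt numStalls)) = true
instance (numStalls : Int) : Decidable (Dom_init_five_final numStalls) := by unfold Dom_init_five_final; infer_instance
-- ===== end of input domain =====

-- B replaces the five explicitly nested append-loops with one uniform recursive
-- level builder; same output and cost, simpler decomposition.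

-- ===== PORT A =====
-- literal transliteration: each Python for-loop is a foldl over its range,
-- appending to the accumulator list exactly as A does.
def init_five_final (numStalls : Int) : List (List (List (List (List (List Int))))) :=
  (PySem.List.pyRange 0 numStalls 1).foldl (fun warp_five_c i =>
    warp_five_c ++ [
      (PySem.List.pyRange (i + 1) numStalls 1).foldl (fun stall1 j =>
        stall1 ++ [
          (PySem.List.pyRange (j + 1) numStalls 1).foldl (fun stall2 k =>
            stall2 ++ [
              (PySem.List.pyRange (k + 1) numStalls 1).foldl (fun stall3 k1 =>
                stall3 ++ [
                  (PySem.List.pyRange (k1 + 1) numStalls 1).foldl (fun stall4 _k2 =>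
                    stall4 ++ [[0, 0]]) []
                ]) []
            ]) []
        ]) []
    ]) []

-- ===== PORT B =====
-- one level of B's recursive build: the list comprehension
-- [f (x+1) for x in range(start, numStalls)]
def pvLevel {α : Type} (numStalls : Int) (f : Int → α) (start : Int) : List α :=
  (PySem.List.pyRange start numStalls 1).map (fun x => f (x + 1))

def init_five_final_alt (numStalls : Int) : List (List (List (List (List (List Int))))) :=
  -- build(0, 5): five uniform levels, base case the fresh [0, 0] leaf
  pvLevel numStalls (pvLevel numStalls (pvLevel numStalls (pvLevel numStalls
    (pvLevel numStalls (fun _ => ([0, 0] : List Int)))))) 0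

-- ===== PRECONDITION & SPEC =====
def Spec_init_five_final (numStalls : Int) (out : List (List (List (List (List (List Int)))))) : Prop := out = init_five_final_alt numStalls
instance (numStalls : Int) (out : List (List (List (List (List (List Int)))))) : Decidable (Spec_init_five_final numStalls out) := by unfold Spec_init_five_final; infer_instance

-- ===== CLAIM (what is proved, stated in full; the proofs are below) =====
def Claim_equal_init_five_final : Prop := ∀ (numStalls : Int), Dom_init_five_final numStalls → Spec_init_five_final numStalls (init_five_final numStalls)

-- ===== LEMMAS AND PROOFS =====
-- an append-accumulating foldl is a map
theorem pv_foldl_append_map {α β : Type} (xs : List α) (f : α → β) (acc : List β) :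
    xs.foldl (fun a i => a ++ [f i]) acc = acc ++ xs.map f := by
  induction xs generalizing acc with
  | nil => simp
  | cons x xs ih => simp [List.foldl, ih]

-- ===== VERDICT (by name: the statement is the Claim_ definition above) =====
theorem init_five_final_spec : Claim_equal_init_five_final := by
  intro n _
  show init_five_final n = init_five_final_alt n
  simp only [init_five_final, init_five_final_alt, pvLevel, pv_foldl_append_map,
    List.nil_append]
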